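-- pv_equiv track=rewrite | github.com/breadboard-ai/breadboard | packages/opal-backend/opal_backend/pidgin.py | _merge_text_parts
-- ===== SOURCE A (Python) =====
-- from typing import Any
--
-- def _merge_text_parts(
--     parts: list[dict[str, Any]], separator: str = "\n"
-- ) -> list[dict[str, Any]]:
--     """Merge consecutive text parts into a single text part.
--
--     Non-text parts (inlineData, fileData, etc.) are left as-is.
--     """
--     merged: list[dict[str, Any]] = []
--     for part in parts:
--         if "text" in part and len(part) == 1:
--             # This is a pure text part
--             if merged and "text" in merged[-1] and len(merged[-1]) == 1:
--                 merged[-1]["text"] += separator + part["text"]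
--             else:
--                 merged.append(dict(part))
--         else:
--             merged.append(part)
--     return merged
-- ===== SOURCE B (Python) =====
-- from typing import Any
--
--
-- def _is_pure_text(part: dict[str, Any]) -> bool:
--     return "text" in part and len(part) == 1
--
--
-- def _merge_text_parts(
--     parts: list[dict[str, Any]], separator: str = "\n"
-- ) -> list[dict[str, Any]]:
--     """Merge consecutive text parts into a single text part.
--
--     Run-based scan: find each maximal run of pure-text parts and emit one
--     freshly built text part joining the run; copy non-text parts through.
--     """
--     out: list[dict[str, Any]] = []
--     i, n = 0, len(parts)
--     while i < n:
--         if _is_pure_text(parts[i]):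
--             j = i
--             while j < n and _is_pure_text(parts[j]):
--                 j += 1
--             out.append({"text": separator.join(p["text"] for p in parts[i:j])})
--             i = j
--         else:
--             out.append(parts[i])
--             i += 1
--     return out
-- ===== Notes on version B (the rewrite author's own statement) =====
-- stated objective: alternative
-- what changed: Replaces A's accumulator pass that mutates the last appended dict (merged[-1]['text'] += sep + ...) by a run-based two-index scan that finds each maximal run of pure-text parts and emits one part built with separator.join over the run.
import Mathlib
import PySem

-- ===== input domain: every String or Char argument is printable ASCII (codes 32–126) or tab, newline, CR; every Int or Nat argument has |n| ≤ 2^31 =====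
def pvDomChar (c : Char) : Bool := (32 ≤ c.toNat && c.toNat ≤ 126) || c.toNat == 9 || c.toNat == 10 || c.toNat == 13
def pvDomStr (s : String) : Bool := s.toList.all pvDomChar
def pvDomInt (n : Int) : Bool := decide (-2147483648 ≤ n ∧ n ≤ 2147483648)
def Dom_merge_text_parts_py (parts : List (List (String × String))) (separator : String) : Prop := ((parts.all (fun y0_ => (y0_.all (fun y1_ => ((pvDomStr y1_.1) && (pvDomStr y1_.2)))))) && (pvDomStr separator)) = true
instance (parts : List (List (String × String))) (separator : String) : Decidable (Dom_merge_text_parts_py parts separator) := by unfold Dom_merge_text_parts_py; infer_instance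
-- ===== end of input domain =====

-- B replaces A's accumulator pass (which mutates the last appended dict) by a run-based
-- scan joining each maximal run of pure-text parts: an alternative decomposition, same cost.
-- A mutates its text accumulator dicts in place but never the caller's parts; the equivalence is about the return value.

-- ===== PORT A =====

-- '"text" in part and len(part) == 1'
def pvIsPureText (p : List (String × String)) : Bool :=
  decide ("text" ∈ p.map Prod.fst) && (p.length == 1)

-- part["text"] dict lookup (first matching key); only used where "text" is a key, so .getD "" never fires
def pvGetText (p : List (String × String)) : String :=
  ((p.find? (fun kv => kv.1 == "text")).map Prod.snd).getD ""

-- one iteration of A's loop; 'merged[-1]["text"] += separator + part["text"]' rebuilds the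
-- length-1 dict {"text": old} as {"text": old + sep + new}, which is the in-place update's value
def pvAStep (sep : String) (merged : List (List (String × String))) (part : List (String × String)) : List (List (String × String)) :=
  if pvIsPureText part then
    match merged.getLast? with
    | some last =>
      if pvIsPureText last then
        merged.dropLast ++ [[("text", pvGetText last ++ sep ++ pvGetText part)]]
      else merged ++ [part]
    | none => merged ++ [part]
  else merged ++ [part]

def merge_text_parts_py (parts : List (List (String × String))) (separator : String) : List (List (String × String)) :=
  parts.foldl (pvAStep separator) []

-- ===== PORT B =====

-- inner 'while j < n and _is_pure_text(parts[j])': texts of the leading pure-text run, and the rest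
def pvSpanText : List (List (String × String)) → List String × List (List (String × String))
  | [] => ([], [])
  | p :: rest =>
    if pvIsPureText p then
      let s := pvSpanText rest
      (pvGetText p :: s.1, s.2)
    else ([], p :: rest)

theorem pvSpanText_length_le : ∀ l : List (List (String × String)), (pvSpanText l).2.length ≤ l.length := by
  intro l
  induction l with
  | nil => simp [pvSpanText]
  | cons p rest ih =>
    simp only [pvSpanText]
    split
    · exact Nat.le_succ_of_le ih
    · simp

-- B's outer while loop: emit one joined text part per pure-text run, copy other parts through
def pvBGo (sep : String) : List (List (String × String)) → List (List (String × String))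
  | [] => []
  | p :: rest =>
    if pvIsPureText p then
      [("text", PySem.Str.join sep (pvGetText p :: (pvSpanText rest).1))] :: pvBGo sep (pvSpanText rest).2
    else p :: pvBGo sep rest
termination_by l => l.length
decreasing_by
  · exact Nat.lt_succ_of_le (pvSpanText_length_le rest)
  · simp

def merge_text_parts_py_alt (parts : List (List (String × String))) (separator : String) : List (List (String × String)) :=
  pvBGo separator parts

-- ===== PRECONDITION & SPEC =====
def Spec_merge_text_parts_py (parts : List (List (String × String))) (separator : String) (out : List (List (String × String))) : Prop := out = merge_text_parts_py_alt parts separator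
instance (parts : List (List (String × String))) (separator : String) (out : List (List (String × String))) : Decidable (Spec_merge_text_parts_py parts separator out) := by unfold Spec_merge_text_parts_py; infer_instance

-- ===== CLAIM (what is proved, stated in full; the proofs are below) =====
def Claim_equal_merge_text_parts_py : Prop := ∀ (parts : List (List (String × String))) (separator : String), Dom_merge_text_parts_py parts separator → Spec_merge_text_parts_py parts separator (merge_text_parts_py parts separator)

-- ===== LEMMAS AND PROOFS =====

theorem pvIsPureText_singleton (t : String) : pvIsPureText [("text", t)] = true := by
  simp [pvIsPureText]

theorem pvGetText_singleton (t : String) : pvGetText [("text", t)] = t := by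
  simp [pvGetText, List.find?]

theorem pvPureText_eq (p : List (String × String)) (h : pvIsPureText p = true) :
    p = [("text", pvGetText p)] := by
  match p with
  | [] => simp [pvIsPureText] at h
  | [(k, v)] =>
    simp [pvIsPureText] at h
    subst h
    simp [pvGetText_singleton]
  | a :: b :: rest => simp [pvIsPureText] at h

theorem pvCharsJoinStep (sep a b : List Char) (rest : List (List Char)) :
    PySem.Chars.join sep (a :: b :: rest) = PySem.Chars.join sep ((a ++ sep ++ b) :: rest) := by
  cases rest with
  | nil => simp [PySem.Chars.join_cons_cons, PySem.Chars.join_singleton]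
  | cons c rest' =>
    simp [PySem.Chars.join_cons_cons, List.append_assoc]

theorem pvJoinStep (sep t s : String) (ts : List String) :
    PySem.Str.join sep (t :: s :: ts) = PySem.Str.join sep ((t ++ sep ++ s) :: ts) := by
  rw [← String.toList_inj]
  simp only [PySem.Str.toList_join, List.map_cons, String.toList_append]
  exact pvCharsJoinStep sep.toList t.toList s.toList (ts.map String.toList)

theorem pvJoinCons (sep : String) : ∀ (ts : List String) (t : String),
    PySem.Str.join sep (t :: ts) = ts.foldl (fun a s => a ++ sep ++ s) t := by
  intro ts
  induction ts with
  | nil =>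
    intro t
    rw [← String.toList_inj]
    simp [PySem.Str.toList_join, PySem.Chars.join_singleton]
  | cons s ts' ih =>
    intro t
    rw [pvJoinStep, ih (t ++ sep ++ s)]
    simp [List.foldl]

-- the main invariant: starting from an accumulator whose last element (if any) is not pure text,
-- (1) A's fold appends exactly B's output; (2) starting from acc ++ [{"text": t}], A's fold folds
-- the separator-joins of the leading text run into t and then appends B's output for the rest.
theorem pvMain : ∀ (n : Nat) (sep : String) (parts : List (List (String × String))),
    parts.length ≤ n →
    ∀ (acc : List (List (String × String))),
      (∀ l, acc.getLast? = some l → pvIsPureText l = false) →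
      (parts.foldl (pvAStep sep) acc = acc ++ pvBGo sep parts) ∧
      (∀ t, parts.foldl (pvAStep sep) (acc ++ [[("text", t)]]) =
        acc ++ [("text", (pvSpanText parts).1.foldl (fun a s => a ++ sep ++ s) t)]
          :: pvBGo sep (pvSpanText parts).2) := by
  intro n
  induction n with
  | zero =>
    intro sep parts hlen acc hacc
    have : parts = [] := List.length_eq_zero_iff.mp (Nat.le_zero.mp hlen)
    subst this
    refine ⟨by simp [pvBGo], ?_⟩
    intro t
    simp [pvSpanText, pvBGo]
  | succ n ih =>
    intro sep parts hlen acc hacc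
    cases parts with
    | nil =>
      refine ⟨by simp [pvBGo], ?_⟩
      intro t
      simp [pvSpanText, pvBGo]
    | cons p rest =>
      have hrest : rest.length ≤ n := Nat.le_of_succ_le_succ hlen
      constructor
      · -- clause (1)
        by_cases hp : pvIsPureText p = true
        · -- first step appends a fresh copy of p = [("text", v)]
          have hstep : pvAStep sep acc p = acc ++ [p] := by
            unfold pvAStep
            rw [hp]
            simp only [if_true]
            cases h : acc.getLast? with
            | none => rfl
            | some l => simp [hacc l h]
          have hpe := pvPureText_eq p hp
          have h2 := (ih sep rest hrest acc hacc).2 (pvGetText p)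
          simp only [List.foldl_cons, hstep]
          conv_lhs => rw [hpe]
          rw [h2]
          simp only [pvBGo, hp, if_true]
          rw [pvJoinCons]
        · have hstep : pvAStep sep acc p = acc ++ [p] := by
            unfold pvAStep
            rw [Bool.not_eq_true] at hp
            rw [hp]
            simp
          have hacc' : ∀ l, (acc ++ [p]).getLast? = some l → pvIsPureText l = false := by
            intro l hl
            rw [List.getLast?_concat] at hl
            cases hl
            rwa [Bool.not_eq_true] at hp
          have h1 := (ih sep rest hrest (acc ++ [p]) hacc').1
          simp only [List.foldl_cons, hstep, h1]
          simp [pvBGo, hp]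
      · -- clause (2)
        intro t
        by_cases hp : pvIsPureText p = true
        · -- A merges p's text into the trailing text part
          have hstep : pvAStep sep (acc ++ [[("text", t)]]) p =
              acc ++ [[("text", t ++ sep ++ pvGetText p)]] := by
            unfold pvAStep
            rw [hp]
            simp only [if_true, List.getLast?_concat, pvIsPureText_singleton, if_true,
              List.dropLast_concat, pvGetText_singleton]
          have h2 := (ih sep rest hrest acc hacc).2 (t ++ sep ++ pvGetText p)
          simp only [List.foldl_cons, hstep, h2, pvSpanText, hp, if_true]
        · -- run is empty: A appends p after the text part, then clause (1) applies
          have hstep : pvAStep sep (acc ++ [[("text", t)]]) p = (acc ++ [[("text", t)]]) ++ [p] := by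
            unfold pvAStep
            rw [Bool.not_eq_true] at hp
            rw [hp]
            simp
          have hacc' : ∀ l, ((acc ++ [[("text", t)]]) ++ [p]).getLast? = some l →
              pvIsPureText l = false := by
            intro l hl
            rw [List.getLast?_concat] at hl
            cases hl
            rwa [Bool.not_eq_true] at hp
          have h1 := (ih sep rest hrest ((acc ++ [[("text", t)]]) ++ [p]) hacc').1
          simp only [List.foldl_cons, hstep, h1, pvSpanText, hp]
          simp [pvBGo, hp]

-- ===== VERDICT (by name: the statement is the Claim_ definition above) =====
theorem merge_text_parts_py_spec : Claim_equal_merge_text_parts_py := by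
  unfold Claim_equal_merge_text_parts_py
  intro parts sep _
  unfold Spec_merge_text_parts_py merge_text_parts_py merge_text_parts_py_alt
  have h := (pvMain parts.length sep parts (Nat.le_refl _) [] (by intro l hl; simp at hl)).1
  simpa using h
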